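-- pv_equiv track=rewrite | github.com/chaitanyamalaviya/ExpertQA | modeling/response_collection/split_ans_to_claims.py | fix_sentence_boundaries
-- ===== SOURCE A (Python) =====
-- def fix_sentence_boundaries(claim_sents):
--     modified_sentences = []
--     for i in range(len(claim_sents)):
--         if i == len(claim_sents) - 1:
--             modified_sentences.append(claim_sents[i])
--             break
--
--         next_sentence = claim_sents[i+1]
--         bracketed_strings = ''
--         while next_sentence.startswith('[') and ']' in next_sentence:
--             end_index = next_sentence.index(']') + 1
--             bracketed_strings += next_sentence[:end_index]
--             next_sentence = next_sentence[end_index:].lstrip()  # remove leading whitespaces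
--
--         modified_sentences.append(claim_sents[i] + ' ' + bracketed_strings)
--         claim_sents[i+1] = next_sentence
--     return modified_sentences
-- ===== SOURCE B (Python) =====
-- def _split_leading_brackets(s):
--     """Pass-1 helper: peel leading '[...]' groups off s, skipping whitespace
--     after each group; return (concatenated bracket text, remainder)."""
--     parts = []
--     rest = s
--     while rest[:1] == '[':
--         close = rest.find(']')
--         if close < 0:
--             break
--         parts.append(rest[:close + 1])
--         rest = rest[close + 1:]
--         while rest[:1].isspace():
--             rest = rest[1:]
--     return ''.join(parts), rest
--
--
-- def fix_sentence_boundaries(claim_sents):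
--     if not claim_sents:
--         return []
--     # pass 1: a bracket table for every sentence after the first
--     table = [_split_leading_brackets(s) for s in claim_sents[1:]]
--     stripped = [claim_sents[0]] + [rem for _, rem in table]
--     brackets = [b for b, _ in table]
--     # pass 2: assemble the result from the two tables
--     out = [s + ' ' + b for s, b in zip(stripped, brackets)]
--     out.append(stripped[-1])
--     return out
-- ===== Notes on version B (the rewrite author's own statement) =====
-- stated objective: alternative
-- what changed: A's single stateful scan that mutates claim_sents[i+1] in place while appending is replaced by a pure two-pass version: pass 1 builds a (brackets, remainder) table for every sentence after the first with a char-level splitter, pass 2 assembles the result by zipping the stripped sentences with the following sentence's bracket text; B does not mutate its argument (return values agree).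
import Mathlib
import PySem

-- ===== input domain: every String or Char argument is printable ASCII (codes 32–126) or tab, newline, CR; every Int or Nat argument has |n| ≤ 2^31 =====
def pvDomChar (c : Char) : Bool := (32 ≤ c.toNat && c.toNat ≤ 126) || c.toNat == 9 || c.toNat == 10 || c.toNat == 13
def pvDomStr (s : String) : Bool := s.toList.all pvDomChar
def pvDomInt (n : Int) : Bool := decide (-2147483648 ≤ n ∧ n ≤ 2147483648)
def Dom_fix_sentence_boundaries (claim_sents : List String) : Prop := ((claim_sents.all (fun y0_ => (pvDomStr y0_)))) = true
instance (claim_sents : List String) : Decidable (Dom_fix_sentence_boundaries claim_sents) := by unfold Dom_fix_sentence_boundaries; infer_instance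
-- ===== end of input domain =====

-- B replaces A's single stateful scan (which mutates claim_sents in place) by a pure two-pass
-- version: a bracket/remainder table built first, then assembly by zip.
-- A mutates its argument in place; B does not — the equivalence proved is about the RETURN value only.

-- ===== PORT A =====
-- A's inner while loop: accumulate leading '[...]' groups of `next`, lstrip between groups.
def fixA_strip (acc next : List Char) : List Char × List Char :=
  if PySem.Chars.startswith next ['['] && PySem.Chars.isIn [']'] next then
    let end_index : Int := PySem.Chars.find next [']'] + 1
    fixA_strip (acc ++ PySem.Chars.slice next none (some end_index))
               (PySem.Chars.lstrip (PySem.Chars.slice next (some end_index) none))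
  else (acc, next)
termination_by next.length
decreasing_by
  rename_i h
  simp only [Bool.and_eq_true, PySem.Chars.startswith_iff, PySem.Chars.isIn_iff_infix] at h
  have hfind : 0 ≤ PySem.Chars.find next [']'] := (PySem.Chars.find_nonneg_iff _ _).2 h.2
  have hne : next ≠ [] := by
    rcases h.1 with ⟨t, ht⟩; subst ht; simp
  have hlen : 0 < next.length := List.length_pos_iff.2 hne
  rw [PySem.Chars.slice_eq_listSlice,
      PySem.List.slice_from next (by omega : (0:Int) ≤ PySem.Chars.find next [']'] + 1)]
  calc (PySem.Chars.lstrip (next.drop (PySem.Chars.find next [']'] + 1).toNat)).length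
      ≤ (next.drop (PySem.Chars.find next [']'] + 1).toNat).length := by
        simp only [PySem.Chars.lstrip]; exact List.length_dropWhile_le _ _
    _ < next.length := by
        simp only [List.length_drop]; omega

-- A's indexed for-loop with in-place mutation of claim_sents[i+1], as structural recursion
def fixA_go : List (List Char) → List (List Char)
  | [] => []
  | [x] => [x]
  | x :: y :: rest =>
    let p := fixA_strip [] y
    (x ++ [' '] ++ p.1) :: fixA_go (p.2 :: rest)
termination_by l => l.length
decreasing_by simp

def fix_sentence_boundaries (claim_sents : List String) : List String :=
  (fixA_go (claim_sents.map String.toList)).map String.ofList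

-- ===== PORT B =====
-- Source B's inner `while rest[:1].isspace(): rest = rest[1:]`
def fixB_skip : List Char → List Char
  | [] => []
  | c :: cs => if PySem.Chars.isspace c then fixB_skip cs else c :: cs

-- needed by fixB_split_go's termination proof, cited there by name
theorem fixB_skip_length_le (l : List Char) : (fixB_skip l).length ≤ l.length := by
  induction l with
  | nil => simp [fixB_skip]
  | cons c cs ih =>
    simp only [fixB_skip]
    split
    · exact le_trans ih (by simp)
    · simp

-- Source B's `while rest[:1] == '[': …` loop of _split_leading_brackets
def fixB_split_go (parts : List (List Char)) (rest : List Char) : List (List Char) × List Char :=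
  if rest.take 1 = ['['] then
    let close := PySem.Chars.find rest [']']
    if close < 0 then (parts, rest)
    else fixB_split_go (parts ++ [rest.take (close.toNat + 1)])
                       (fixB_skip (rest.drop (close.toNat + 1)))
  else (parts, rest)
termination_by rest.length
decreasing_by
  rename_i h hclose
  have hne : rest ≠ [] := by intro he; subst he; simp at h
  have hlen : 0 < rest.length := List.length_pos_iff.2 hne
  calc (fixB_skip (rest.drop ((PySem.Chars.find rest [']']).toNat + 1))).length
      ≤ (rest.drop ((PySem.Chars.find rest [']']).toNat + 1)).length := fixB_skip_length_le _
    _ < rest.length := by simp only [List.length_drop]; omega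

def fixB_split (s : List Char) : List Char × List Char :=
  let p := fixB_split_go [] s
  (p.1.flatten, p.2)

def fix_sentence_boundaries_alt (claim_sents : List String) : List String :=
  match claim_sents.map String.toList with
  | [] => []
  | first :: restS =>
    let table := restS.map fixB_split
    let stripped := first :: table.map Prod.snd
    let brackets := table.map Prod.fst
    let out := (stripped.zip brackets).map (fun p => p.1 ++ [' '] ++ p.2)
    (out ++ [PySem.List.pyGetD stripped (-1) []]).map String.ofList

-- ===== PRECONDITION & SPEC =====
def Spec_fix_sentence_boundaries (claim_sents : List String) (out : List String) : Prop := out = fix_sentence_boundaries_alt claim_sents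
instance (claim_sents : List String) (out : List String) : Decidable (Spec_fix_sentence_boundaries claim_sents out) := by unfold Spec_fix_sentence_boundaries; infer_instance

-- ===== CLAIM (what is proved, stated in full; the proofs are below) =====
def Claim_equal_fix_sentence_boundaries : Prop := ∀ (claim_sents : List String), Dom_fix_sentence_boundaries claim_sents → Spec_fix_sentence_boundaries claim_sents (fix_sentence_boundaries claim_sents)

-- ===== LEMMAS AND PROOFS =====

theorem fixB_skip_eq_lstrip (l : List Char) : fixB_skip l = PySem.Chars.lstrip l := by
  induction l with
  | nil => simp [fixB_skip, PySem.Chars.lstrip]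
  | cons c cs ih =>
    simp only [fixB_skip, PySem.Chars.lstrip, List.dropWhile_cons]
    split_ifs with h
    · simpa [PySem.Chars.lstrip] using ih
    · rfl

-- accumulator law for B's bracket loop
theorem fixB_split_go_acc_aux (n : Nat) : ∀ rest : List Char, rest.length ≤ n → ∀ parts,
    fixB_split_go parts rest = (parts ++ (fixB_split_go [] rest).1, (fixB_split_go [] rest).2) := by
  induction n with
  | zero =>
    intro rest h parts
    have : rest = [] := List.length_eq_zero_iff.1 (Nat.le_zero.1 h)
    subst this
    rw [fixB_split_go, fixB_split_go]; simp
  | succ n ih =>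
    intro rest h parts
    rw [fixB_split_go, fixB_split_go]
    by_cases h1 : rest.take 1 = ['[']
    · simp only [h1, if_true]
      by_cases h2 : PySem.Chars.find rest [']'] < 0
      · simp [h2]
      · simp only [h2, if_false]
        have hne : rest ≠ [] := by intro he; subst he; simp at h1
        have hlen : 0 < rest.length := List.length_pos_iff.2 hne
        have hrec : (fixB_skip (rest.drop ((PySem.Chars.find rest [']']).toNat + 1))).length ≤ n := by
          have := fixB_skip_length_le (rest.drop ((PySem.Chars.find rest [']']).toNat + 1))
          simp only [List.length_drop] at this
          omega
        rw [ih _ hrec (parts ++ [rest.take ((PySem.Chars.find rest [']']).toNat + 1)]),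
            ih _ hrec ([] ++ [rest.take ((PySem.Chars.find rest [']']).toNat + 1)])]
        simp
    · simp [h1]

theorem fixB_split_go_acc (rest : List Char) (parts : List (List Char)) :
    fixB_split_go parts rest = (parts ++ (fixB_split_go [] rest).1, (fixB_split_go [] rest).2) :=
  fixB_split_go_acc_aux rest.length rest le_rfl parts

-- the two bracket-stripping loops agree
theorem strip_eq_split_aux (n : Nat) : ∀ s : List Char, s.length ≤ n → ∀ acc,
    fixA_strip acc s = (acc ++ (fixB_split s).1, (fixB_split s).2) := by
  induction n with
  | zero =>
    intro s h acc
    have : s = [] := List.length_eq_zero_iff.1 (Nat.le_zero.1 h)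
    subst this
    rw [fixA_strip]; unfold fixB_split; rw [fixB_split_go]; simp [PySem.Chars.startswith]
  | succ n ih =>
    intro s h acc
    rw [fixA_strip]; unfold fixB_split; rw [fixB_split_go]
    have htake : (PySem.Chars.startswith s ['['] = true) ↔ s.take 1 = ['['] := by
      rw [PySem.Chars.startswith_iff, List.prefix_iff_eq_take]
      constructor <;> (intro h'; exact h'.symm)
    by_cases h1 : s.take 1 = ['[']
    · by_cases h2 : PySem.Chars.find s [']'] < 0
      · -- no closing bracket: A's `']' in s` is false, B breaks
        have hnotin : PySem.Chars.isIn [']'] s = false := by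
          rw [PySem.Chars.isIn_eq_false_iff]
          intro hinf
          exact absurd ((PySem.Chars.find_nonneg_iff s [']']).2 hinf) (by omega)
        simp [hnotin, h2]
      · -- a bracket group is consumed by both
        have hfind : 0 ≤ PySem.Chars.find s [']'] := by omega
        have hin : PySem.Chars.isIn [']'] s = true := by
          rw [PySem.Chars.isIn_iff_infix]
          exact (PySem.Chars.find_nonneg_iff s [']']).1 hfind
        have hsw : PySem.Chars.startswith s ['['] = true := htake.2 h1
        simp only [hsw, hin, Bool.and_self, if_true, h2, if_false]
        have hne : s ≠ [] := by intro he; subst he; simp at h1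
        have hlen : 0 < s.length := List.length_pos_iff.2 hne
        have htn : (PySem.Chars.find s [']'] + 1).toNat = (PySem.Chars.find s [']']).toNat + 1 := by
          omega
        rw [PySem.Chars.slice_eq_listSlice, PySem.Chars.slice_eq_listSlice,
            PySem.List.slice_to s (by omega : (0:Int) ≤ PySem.Chars.find s [']'] + 1),
            PySem.List.slice_from s (by omega : (0:Int) ≤ PySem.Chars.find s [']'] + 1),
            htn, ← fixB_skip_eq_lstrip]
        have hrec : (fixB_skip (s.drop ((PySem.Chars.find s [']']).toNat + 1))).length ≤ n := by
          have := fixB_skip_length_le (s.drop ((PySem.Chars.find s [']']).toNat + 1))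
          simp only [List.length_drop] at this
          omega
        rw [ih _ hrec]
        rw [fixB_split_go_acc (fixB_skip (s.drop ((PySem.Chars.find s [']']).toNat + 1)))
              ([] ++ [s.take ((PySem.Chars.find s [']']).toNat + 1)])]
        unfold fixB_split
        simp [h1]
    · -- no leading '[': both stop
      have hsw : PySem.Chars.startswith s ['['] = false := by
        rw [Bool.eq_false_iff]; intro hc; exact h1 (htake.1 hc)
      simp [hsw, h1]

theorem strip_eq_split (s acc : List Char) :
    fixA_strip acc s = (acc ++ (fixB_split s).1, (fixB_split s).2) :=
  strip_eq_split_aux s.length s le_rfl acc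

-- A's scan equals B's table-then-zip assembly, element by element
theorem go_eq_alt (r : List (List Char)) : ∀ x : List Char,
    fixA_go (x :: r) =
      (((x :: (r.map fixB_split).map Prod.snd).zip ((r.map fixB_split).map Prod.fst)).map
        (fun p => p.1 ++ [' '] ++ p.2))
      ++ [PySem.List.pyGetD (x :: (r.map fixB_split).map Prod.snd) (-1) []] := by
  induction r with
  | nil =>
    intro x
    simp only [fixA_go, List.map_nil, List.zip_nil_right, List.map_nil, List.nil_append]
    congr 1
  | cons y rest ih =>
    intro x
    simp only [fixA_go]
    have hs := strip_eq_split y []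
    simp only [List.nil_append] at hs
    rw [hs]
    rw [ih (fixB_split y).2]
    simp only [List.map_cons, List.zip_cons_cons, List.map_cons, List.cons_append]
    congr 2
    simp [PySem.List.pyGetD, PySem.List.pyGet?, PySem.List.pyIdx?]
    try rfl

-- ===== VERDICT (by name: the statement is the Claim_ definition above) =====
theorem fix_sentence_boundaries_spec : Claim_equal_fix_sentence_boundaries := by
  intro cs _
  unfold Spec_fix_sentence_boundaries fix_sentence_boundaries fix_sentence_boundaries_alt
  cases h : cs.map String.toList with
  | nil => simp [fixA_go]
  | cons first restS => rw [go_eq_alt restS first]
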